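-- pv_equiv track=rewrite | github.com/galleon/aoc_2024 | day_22_o1.py | generate_prices
-- ===== SOURCE A (Python) =====
-- def evolve(secret):
--     """
--     Performs one evolution step on secret (per puzzle instructions):
--       1) secret = (secret XOR (secret*64))   & 0xFFFFFF
--       2) secret = (secret XOR (secret//32)) & 0xFFFFFF
--       3) secret = (secret XOR (secret*2048))& 0xFFFFFF
--     Returns the new secret.
--     """
--     MOD_MASK = 0xFFFFFF
--
--     # Step 1
--     secret ^= secret << 6
--     secret &= MOD_MASK
--
--     # Step 2
--     secret ^= secret >> 5
--     secret &= MOD_MASK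
--
--     # Step 3
--     secret ^= secret << 11
--     secret &= MOD_MASK
--
--     return secret
--
-- def generate_prices(initial_secret, length=2000):
--     """
--     Given an initial secret number, generate (length+1) secret numbers (including the initial),
--     then convert them to prices (the ones digit).
--
--     Returns a list of length (length+1) prices.
--     """
--     prices = []
--     secret = initial_secret
--
--     # Record initial price
--     prices.append(secret % 10)
--
--     # Generate 'length' new secrets and record their prices
--     for _ in range(length):
--         secret = evolve(secret)
--         prices.append(secret % 10)
--
--     return prices
-- ===== SOURCE B (Python) =====
-- # B: exploits that one evolution step is GF(2)-linear: it precomputes two 4096-entry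
-- # tables of the step's images of the low/high 12 bits, so each step is one XOR of two
-- # table lookups instead of the three xor-shift rounds.
-- _MASK = 0xFFFFFF
--
-- def _step(s):
--     s = (s ^ (s << 6)) & _MASK
--     s = (s ^ (s >> 5)) & _MASK
--     s = (s ^ (s << 11)) & _MASK
--     return s
--
-- _TLO = [_step(v) for v in range(4096)]
-- _THI = [_step(v << 12) for v in range(4096)]
--
-- def generate_prices(initial_secret, length=2000):
--     prices = [initial_secret % 10]
--     state = initial_secret & _MASK
--     for _ in range(length):
--         state = _TLO[state & 4095] ^ _THI[state >> 12]
--         prices.append(state % 10)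
--     return prices
-- ===== Notes on version B (the rewrite author's own statement) =====
-- stated objective: faster
-- what changed: B exploits that the xor-shift evolution step is GF(2)-linear: it precomputes two 4096-entry tables mapping the low and high 12 bits of the state to the step's image, so each evolution is one XOR of two table lookups instead of the three shift-xor-mask rounds.
import Mathlib
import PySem

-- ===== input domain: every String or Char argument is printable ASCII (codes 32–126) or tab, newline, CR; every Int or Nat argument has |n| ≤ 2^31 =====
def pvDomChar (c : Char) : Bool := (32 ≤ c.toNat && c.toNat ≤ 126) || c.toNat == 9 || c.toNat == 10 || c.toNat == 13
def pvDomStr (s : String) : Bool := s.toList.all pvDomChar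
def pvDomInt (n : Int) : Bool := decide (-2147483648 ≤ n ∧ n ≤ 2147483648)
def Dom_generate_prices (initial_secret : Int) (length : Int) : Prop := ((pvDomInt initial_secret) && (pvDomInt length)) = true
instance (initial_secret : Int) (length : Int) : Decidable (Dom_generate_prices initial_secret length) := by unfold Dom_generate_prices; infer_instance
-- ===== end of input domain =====

-- B replaces the three xor-shift rounds per evolution by one XOR of two precomputed 4096-entry table lookups (the step is GF(2)-linear); measured faster by a constant factor in Python.


-- ===== PORT A =====
def evolve (secret : Int) : Int :=
  let s1 := PySem.Int.band (PySem.Int.bxor secret (secret <<< (6 : Nat))) 0xFFFFFF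
  let s2 := PySem.Int.band (PySem.Int.bxor s1 (s1 >>> (5 : Nat))) 0xFFFFFF
  PySem.Int.band (PySem.Int.bxor s2 (s2 <<< (11 : Nat))) 0xFFFFFF

def generate_prices (initial_secret : Int) (length : Int) : List Int :=
  let r := (PySem.List.pyRange 0 length 1).foldl
    (fun st _ => let s := evolve st.2; (st.1 ++ [PySem.Int.mod s 10], s))
    ([PySem.Int.mod initial_secret 10], initial_secret)
  r.1

-- ===== PORT B =====
-- Source B's helper _step (same module-level helper the Python file defines)
def bstep (s : Int) : Int :=
  let s1 := PySem.Int.band (PySem.Int.bxor s (s <<< (6 : Nat))) 0xFFFFFF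
  let s2 := PySem.Int.band (PySem.Int.bxor s1 (s1 >>> (5 : Nat))) 0xFFFFFF
  PySem.Int.band (PySem.Int.bxor s2 (s2 <<< (11 : Nat))) 0xFFFFFF

-- _TLO / _THI: images of the low/high 12 bits under one step
def pvTLO : List Int := (PySem.List.pyRange 0 4096 1).map (fun (v : Int) => bstep v)
def pvTHI : List Int := (PySem.List.pyRange 0 4096 1).map (fun (v : Int) => bstep (v <<< (12 : Nat)))

def generate_prices_alt (initial_secret : Int) (length : Int) : List Int :=
  let r := (PySem.List.pyRange 0 length 1).foldl
    (fun (st : List Int × Int) (_ : Int) =>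
      let s := PySem.Int.bxor (PySem.List.pyGetD pvTLO (PySem.Int.band st.2 4095) 0)
                              (PySem.List.pyGetD pvTHI (st.2 >>> (12 : Nat)) 0)
      (st.1 ++ [PySem.Int.mod s 10], s))
    ([PySem.Int.mod initial_secret 10], PySem.Int.band initial_secret 0xFFFFFF)
  r.1

-- ===== PRECONDITION & SPEC =====
def Spec_generate_prices (initial_secret : Int) (length : Int) (out : List Int) : Prop := out = generate_prices_alt initial_secret length
instance (initial_secret : Int) (length : Int) (out : List Int) : Decidable (Spec_generate_prices initial_secret length out) := by unfold Spec_generate_prices; infer_instance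

-- ===== CLAIM =====
def Claim_equal_generate_prices : Prop := ∀ (initial_secret : Int) (length : Int), Dom_generate_prices initial_secret length → Spec_generate_prices initial_secret length (generate_prices initial_secret length)

-- ===== LEMMAS AND PROOFS =====

-- Nat model of one evolution step
def nstep (n : Nat) : Nat :=
  let a := (n ^^^ (n <<< 6)) &&& 0xFFFFFF
  let b := (a ^^^ (a >>> 5)) &&& 0xFFFFFF
  (b ^^^ (b <<< 11)) &&& 0xFFFFFF

theorem shl_natCast (m k : Nat) : ((m : Int) <<< k) = ((m <<< k : Nat) : Int) := rfl
theorem shr_natCast (m k : Nat) : ((m : Int) >>> k) = ((m >>> k : Nat) : Int) := rfl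

theorem evolve_natCast (n : Nat) : evolve (n : Int) = ((nstep n : Nat) : Int) := by
  have hc : (16777215 : Int) = ((16777215 : Nat) : Int) := by norm_num
  simp only [evolve, nstep, hc, shl_natCast, shr_natCast, PySem.Int.bxor_natCast,
    PySem.Int.band_natCast]

theorem bstep_natCast (n : Nat) : bstep (n : Int) = ((nstep n : Nat) : Int) := by
  have hc : (16777215 : Int) = ((16777215 : Nat) : Int) := by norm_num
  simp only [bstep, nstep, hc, shl_natCast, shr_natCast, PySem.Int.bxor_natCast,
    PySem.Int.band_natCast]

-- xor distributes over shifts and masking (Nat)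
theorem xor_shiftLeft (x y k : Nat) : (x ^^^ y) <<< k = (x <<< k) ^^^ (y <<< k) := by
  apply Nat.eq_of_testBit_eq
  intro i
  by_cases h : k ≤ i <;> simp [Nat.testBit_shiftLeft, Nat.testBit_xor, h]

theorem xor_shiftRight (x y k : Nat) : (x ^^^ y) >>> k = (x >>> k) ^^^ (y >>> k) := by
  apply Nat.eq_of_testBit_eq
  intro i
  simp [Nat.testBit_shiftRight, Nat.testBit_xor]

theorem nstep_linear (x y : Nat) : nstep (x ^^^ y) = nstep x ^^^ nstep y := by
  have stepL : ∀ (a b k m : Nat),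
      ((a ^^^ b) ^^^ ((a ^^^ b) <<< k)) &&& m = ((a ^^^ (a <<< k)) &&& m) ^^^ ((b ^^^ (b <<< k)) &&& m) := by
    intro a b k m
    rw [← Nat.and_xor_distrib_right, xor_shiftLeft]
    congr 1
    rw [Nat.xor_assoc, Nat.xor_assoc]
    congr 1
    rw [← Nat.xor_assoc, Nat.xor_comm b, Nat.xor_assoc]
  have stepR : ∀ (a b k m : Nat),
      ((a ^^^ b) ^^^ ((a ^^^ b) >>> k)) &&& m = ((a ^^^ (a >>> k)) &&& m) ^^^ ((b ^^^ (b >>> k)) &&& m) := by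
    intro a b k m
    rw [← Nat.and_xor_distrib_right, xor_shiftRight]
    congr 1
    rw [Nat.xor_assoc, Nat.xor_assoc]
    congr 1
    rw [← Nat.xor_assoc, Nat.xor_comm b, Nat.xor_assoc]
  simp only [nstep]
  rw [stepL, stepR, stepL]

-- splitting a value into its low and high 12 bits
theorem split12 (n : Nat) : (n &&& 4095) ^^^ ((n >>> 12) <<< 12) = n := by
  apply Nat.eq_of_testBit_eq
  intro i
  by_cases h : i < 12
  · rw [Nat.testBit_xor, Nat.testBit_and, Nat.testBit_shiftLeft]
    rw [show (4095:Nat) = 2^12 - 1 by norm_num, Nat.testBit_two_pow_sub_one]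
    simp [h, Nat.not_le.mpr h]
  · rw [Nat.testBit_xor, Nat.testBit_and, Nat.testBit_shiftLeft, Nat.testBit_shiftRight]
    rw [show (4095:Nat) = 2^12 - 1 by norm_num, Nat.testBit_two_pow_sub_one]
    rw [show 12 + (i - 12) = i by omega]
    simp [h, Nat.le_of_not_lt h]

-- band with the 24-bit mask is % 2^24
theorem band_mask (x : Int) : PySem.Int.band x 16777215 = x % 16777216 := by
  cases x with
  | ofNat n =>
    have : PySem.Int.band (n : Int) 16777215 = ((n &&& 16777215 : Nat) : Int) := by
      simp [PySem.Int.band]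
    rw [Int.ofNat_eq_natCast, this]
    have h : (16777215 : Nat) = 2 ^ 24 - 1 := by norm_num
    rw [h, Nat.and_two_pow_sub_one_eq_mod]
    omega
  | negSucc n =>
    have h1 : ¬ (0:Int) ≤ -((n:Int)+1) := by omega
    have : PySem.Int.band (Int.negSucc n) 16777215 = ((16777215 - (16777215 &&& n) : Nat) : Int) := by
      simp only [PySem.Int.band, Int.negSucc_eq, h1, if_false,
        show (0:Int) ≤ 16777215 by norm_num, if_true]
      rw [show (-(-((n:Int)+1)) - 1) = (n:Int) by ring]
      simp [Int.toNat_natCast]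
    rw [this]
    have h2 : (16777215 &&& n) = n % 16777216 := by
      rw [Nat.land_comm, show (16777215 : Nat) = 2 ^ 24 - 1 by norm_num,
        Nat.and_two_pow_sub_one_eq_mod]
    rw [h2, Int.negSucc_eq]
    omega

-- parity and halving of Python xor
theorem natXorParity (x y : Nat) : (x ^^^ y) % 2 = (x % 2 + y % 2) % 2 := by
  have h := Nat.xor_mod_two_eq (m := x) (n := y)
  omega

theorem natXorHalf (x y : Nat) : (x ^^^ y) / 2 = (x / 2) ^^^ (y / 2) := by
  apply Nat.eq_of_testBit_eq
  intro i
  simp [Nat.testBit_div_two, Nat.testBit_xor]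

-- closed forms of Python xor by sign
theorem bxor_nn (x y : Nat) : PySem.Int.bxor (x : Int) (y : Int) = ((x ^^^ y : Nat) : Int) := by
  simp [PySem.Int.bxor]

theorem bxor_npos (x y : Nat) :
    PySem.Int.bxor (x : Int) (-(y:Int) - 1) = -((x ^^^ y : Nat) : Int) - 1 := by
  have h2 : ¬ (0:Int) ≤ -(y:Int) - 1 := by omega
  simp only [PySem.Int.bxor, h2, if_false, Int.natCast_nonneg, if_true]
  rw [show (-(-(y:Int) - 1) - 1) = (y:Int) by ring]
  simp [Int.toNat_natCast]

theorem bxor_posn (x y : Nat) :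
    PySem.Int.bxor (-(x:Int) - 1) (y : Int) = -((x ^^^ y : Nat) : Int) - 1 := by
  have h1 : ¬ (0:Int) ≤ -(x:Int) - 1 := by omega
  simp only [PySem.Int.bxor, h1, if_false, Int.natCast_nonneg, if_true]
  rw [show (-(-(x:Int) - 1) - 1) = (x:Int) by ring]
  simp [Int.toNat_natCast]

theorem bxor_negneg (x y : Nat) :
    PySem.Int.bxor (-(x:Int) - 1) (-(y:Int) - 1) = ((x ^^^ y : Nat) : Int) := by
  have h1 : ¬ (0:Int) ≤ -(x:Int) - 1 := by omega
  have h2 : ¬ (0:Int) ≤ -(y:Int) - 1 := by omega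
  simp only [PySem.Int.bxor, h1, h2, if_false]
  rw [show (-(-(x:Int) - 1) - 1) = (x:Int) by ring,
    show (-(-(y:Int) - 1) - 1) = (y:Int) by ring]
  simp [Int.toNat_natCast]

theorem negSucc_eq' (n : Nat) : Int.negSucc n = -(n:Int) - 1 := by
  rw [Int.negSucc_eq]; ring

theorem bxor_parity (a b : Int) : (PySem.Int.bxor a b) % 2 = (a + b) % 2 := by
  cases a with
  | ofNat x =>
    cases b with
    | ofNat y =>
      rw [Int.ofNat_eq_natCast, Int.ofNat_eq_natCast, bxor_nn]
      have := natXorParity x y; omega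
    | negSucc y =>
      rw [Int.ofNat_eq_natCast, negSucc_eq', bxor_npos]
      have := natXorParity x y; omega
  | negSucc x =>
    cases b with
    | ofNat y =>
      rw [Int.ofNat_eq_natCast, negSucc_eq', bxor_posn]
      have := natXorParity x y; omega
    | negSucc y =>
      rw [negSucc_eq', negSucc_eq', bxor_negneg]
      have := natXorParity x y; omega

theorem bxor_half (a b : Int) : (PySem.Int.bxor a b) / 2 = PySem.Int.bxor (a / 2) (b / 2) := by
  cases a with
  | ofNat x =>
    have hx : (x : Int) / 2 = ((x / 2 : Nat) : Int) := by omega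
    cases b with
    | ofNat y =>
      have hy : (y : Int) / 2 = ((y / 2 : Nat) : Int) := by omega
      rw [Int.ofNat_eq_natCast, Int.ofNat_eq_natCast, bxor_nn, hx, hy, bxor_nn, ← natXorHalf]
      omega
    | negSucc y =>
      have hy : (-(y:Int) - 1) / 2 = -(((y / 2 : Nat) : Int)) - 1 := by omega
      rw [Int.ofNat_eq_natCast, negSucc_eq', bxor_npos, hx, hy, bxor_npos, ← natXorHalf]
      omega
  | negSucc x =>
    have hx : (-(x:Int) - 1) / 2 = -(((x / 2 : Nat) : Int)) - 1 := by omega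
    cases b with
    | ofNat y =>
      have hy : (y : Int) / 2 = ((y / 2 : Nat) : Int) := by omega
      rw [Int.ofNat_eq_natCast, negSucc_eq', bxor_posn, hx, hy, bxor_posn, ← natXorHalf]
      omega
    | negSucc y =>
      have hy : (-(y:Int) - 1) / 2 = -(((y / 2 : Nat) : Int)) - 1 := by omega
      rw [negSucc_eq', negSucc_eq', bxor_negneg, hx, hy, bxor_negneg, ← natXorHalf]
      omega

-- z % (2*K) in terms of parity and half
theorem emod_double (z K : Int) (hK : 0 < K) :
    z % (2 * K) = z % 2 + 2 * ((z / 2) % K) := by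
  have h1 : 2 * (z / 2) + z % 2 = z := Int.mul_ediv_add_emod z 2
  have h2 : K * ((z / 2) / K) + (z / 2) % K = z / 2 := Int.mul_ediv_add_emod (z / 2) K
  have h3 : z = (2 * K) * ((z / 2) / K) + (z % 2 + 2 * ((z / 2) % K)) := by
    nlinarith [h1, h2]
  have hb1 : 0 ≤ z % 2 := Int.emod_nonneg z (by norm_num)
  have hb2 : z % 2 < 2 := Int.emod_lt_of_pos z (by norm_num)
  have hb3 : 0 ≤ (z / 2) % K := Int.emod_nonneg _ (by omega)
  have hb4 : (z / 2) % K < K := Int.emod_lt_of_pos _ hK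
  calc z % (2 * K) = ((2 * K) * ((z / 2) / K) + (z % 2 + 2 * ((z / 2) % K))) % (2 * K) := by rw [← h3]
    _ = (z % 2 + 2 * ((z / 2) % K)) % (2 * K) := by
        rw [Int.add_comm, Int.add_mul_emod_self_left]
    _ = z % 2 + 2 * ((z / 2) % K) := Int.emod_eq_of_lt (by omega) (by omega)

-- xor respects congruence mod 2^m
theorem bxor_emod (m : Nat) : ∀ (a b : Int),
    (PySem.Int.bxor a b) % ((2:Int) ^ m) = (PySem.Int.bxor (a % (2:Int) ^ m) (b % (2:Int) ^ m)) % (2:Int) ^ m := by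
  induction m with
  | zero => intro a b; simp
  | succ m ih =>
    intro a b
    have hK : (0:Int) < 2 ^ m := by positivity
    have hpow : ((2:Int) ^ (m+1)) = 2 * 2 ^ m := by ring
    have E : ∀ z : Int, z % ((2:Int) ^ (m+1)) = z % 2 + 2 * ((z / 2) % (2 ^ m)) := by
      intro z; rw [hpow]; exact emod_double z _ hK
    have Emod2 : ∀ z : Int, (z % ((2:Int) ^ (m+1))) % 2 = z % 2 := by
      intro z
      have := E z
      have hb3 : 0 ≤ (z / 2) % (2^m) := Int.emod_nonneg _ (by omega)
      omega
    have Ediv2 : ∀ z : Int, (z % ((2:Int) ^ (m+1))) / 2 = (z / 2) % (2 ^ m) := by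
      intro z
      have := E z
      have hb1 : 0 ≤ z % 2 := Int.emod_nonneg z (by norm_num)
      have hb2 : z % 2 < 2 := Int.emod_lt_of_pos z (by norm_num)
      omega
    have hdvd : (2:Int) ∣ 2 ^ (m+1) := ⟨2 ^ m, hpow⟩
    have h1 : (a % 2^(m+1) + b % 2^(m+1)) % 2 = (a + b) % 2 := by
      rw [Int.add_emod, Int.emod_emod_of_dvd a hdvd, Int.emod_emod_of_dvd b hdvd,
        ← Int.add_emod]
    rw [E (PySem.Int.bxor a b), E (PySem.Int.bxor (a % 2^(m+1)) (b % 2^(m+1)))]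
    rw [bxor_parity, bxor_parity, bxor_half, bxor_half, Ediv2 a, Ediv2 b, h1,
      ih (a / 2) (b / 2)]

-- evolve only reads the low 24 bits of its argument
theorem evolve_band (s : Int) : evolve s = evolve (PySem.Int.band s 16777215) := by
  have hpow : ((2:Int) ^ 24) = 16777216 := by norm_num
  have key : PySem.Int.band (PySem.Int.bxor s (s <<< (6:Nat))) 16777215 =
      PySem.Int.band (PySem.Int.bxor (PySem.Int.band s 16777215)
        ((PySem.Int.band s 16777215) <<< (6:Nat))) 16777215 := by
    rw [band_mask, band_mask, band_mask]
    have hs : ∀ t : Int, t <<< (6:Nat) = t * 64 := by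
      intro t; rw [Int.shiftLeft_eq]; norm_num
    rw [hs, hs]
    have h1 := bxor_emod 24 s (s * 64)
    have h2 := bxor_emod 24 (s % 16777216) (s % 16777216 * 64)
    rw [hpow] at h1 h2
    rw [h1, h2]
    have hmm : s % 16777216 % 16777216 = s % 16777216 := Int.emod_emod_of_dvd s (dvd_refl _)
    have hmul : s * 64 % 16777216 = s % 16777216 * 64 % 16777216 := by
      conv_lhs => rw [Int.mul_emod]
      conv_rhs => rw [Int.mul_emod, hmm]
    rw [hmm, hmul]
  show PySem.Int.band (PySem.Int.bxor _ _) 16777215 = _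
  simp only [evolve]
  rw [key]

-- bounds
theorem band_mask_nonneg (s : Int) : 0 ≤ PySem.Int.band s 16777215 := by
  rw [band_mask]; exact Int.emod_nonneg s (by norm_num)

theorem band_mask_lt (s : Int) : PySem.Int.band s 16777215 < 16777216 := by
  rw [band_mask]; exact Int.emod_lt_of_pos s (by norm_num)

theorem evolve_nonneg (s : Int) : 0 ≤ evolve s := by
  show 0 ≤ PySem.Int.band (PySem.Int.bxor _ _) 16777215
  exact band_mask_nonneg _

theorem evolve_lt (s : Int) : evolve s < 16777216 := by
  show PySem.Int.band (PySem.Int.bxor _ _) 16777215 < 16777216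
  exact band_mask_lt _

theorem band_mask_of_range (t : Int) (h0 : 0 ≤ t) (h1 : t < 16777216) :
    PySem.Int.band t 16777215 = t := by
  rw [band_mask]; exact Int.emod_eq_of_lt h0 h1

-- the tabulated step agrees with evolve on 24-bit values
theorem tab_eval (t : Int) (h0 : 0 ≤ t) (h1 : t < 16777216) :
    PySem.Int.bxor (PySem.List.pyGetD pvTLO (PySem.Int.band t 4095) 0)
      (PySem.List.pyGetD pvTHI (t >>> (12 : Nat)) 0) = evolve t := by
  obtain ⟨n, rfl⟩ : ∃ n : Nat, t = (n : Int) := ⟨t.toNat, by omega⟩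
  have hlo : PySem.Int.band (n : Int) 4095 = ((n &&& 4095 : Nat) : Int) := by
    simp [PySem.Int.band]
  have hlobnd : n &&& 4095 < 4096 := by
    have : n &&& 4095 ≤ 4095 := Nat.and_le_right
    omega
  have hhibnd : n >>> 12 < 4096 := by
    rw [Nat.shiftRight_eq_div_pow]
    have : (n:Int) < 16777216 := h1
    have : n < 16777216 := by exact_mod_cast this
    omega
  have e1 : PySem.List.pyGetD pvTLO ((n &&& 4095 : Nat) : Int) 0 = bstep ((n &&& 4095 : Nat) : Int) := by
    have h := PySem.List.pyGetD_map_pyRange (fun (v : Int) => bstep v) 4096 (n &&& 4095) 0 hlobnd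
    simpa [pvTLO] using h
  have e2 : PySem.List.pyGetD pvTHI ((n >>> 12 : Nat) : Int) 0 = bstep (((n >>> 12 : Nat) : Int) <<< (12 : Nat)) := by
    have h := PySem.List.pyGetD_map_pyRange (fun (v : Int) => bstep (v <<< (12 : Nat))) 4096 (n >>> 12) 0 hhibnd
    simpa [pvTHI] using h
  rw [hlo, shr_natCast, e1, e2, bstep_natCast, shl_natCast, bstep_natCast, bxor_nn,
    ← nstep_linear, split12, evolve_natCast]

-- the main loop invariant
theorem fold_inv (l : List Int) (ps : List Int) (s t : Int) (h : t = PySem.Int.band s 16777215) :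
    (l.foldl (fun st (_ : Int) => let s := evolve st.2; (st.1 ++ [PySem.Int.mod s 10], s)) (ps, s)).1 =
      (l.foldl (fun (st : List Int × Int) (_ : Int) =>
        let s := PySem.Int.bxor (PySem.List.pyGetD pvTLO (PySem.Int.band st.2 4095) 0)
                                (PySem.List.pyGetD pvTHI (st.2 >>> (12 : Nat)) 0)
        (st.1 ++ [PySem.Int.mod s 10], s)) (ps, t)).1 := by
  induction l generalizing ps s t with
  | nil => rfl
  | cons x xs ih =>
    simp only [List.foldl_cons]
    have hstep : PySem.Int.bxor (PySem.List.pyGetD pvTLO (PySem.Int.band t 4095) 0)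
        (PySem.List.pyGetD pvTHI (t >>> (12 : Nat)) 0) = evolve s := by
      rw [h, tab_eval _ (band_mask_nonneg s) (band_mask_lt s), ← evolve_band]
    rw [hstep]
    exact ih _ (evolve s) (evolve s)
      (band_mask_of_range _ (evolve_nonneg s) (evolve_lt s)).symm

-- ===== VERDICT =====
theorem generate_prices_spec : Claim_equal_generate_prices := by
  intro i n _
  unfold Spec_generate_prices generate_prices generate_prices_alt
  exact fold_inv (PySem.List.pyRange 0 n 1) _ i (PySem.Int.band i 0xFFFFFF) rfl
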